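-- pv_equiv track=rewrite | github.com/noemimotolese/esercizio1 | esercizio2.py | venditaMax
-- ===== SOURCE A (Python) =====
-- def venditaMax(tupla_vendite):
--     vendita_max=0
--     prodotto_max=[]
--     for (reparto, categoria), (prodotto, (metodo, importo)) in tupla_vendite:
--         if importo>vendita_max:
--             vendita_max=importo
--             prodotto_max=[prodotto]
--         elif importo==vendita_max:
--             prodotto_max.append(prodotto)
--     return (vendita_max, (prodotto_max))
-- ===== SOURCE B (Python) =====
-- def venditaMax(tupla_vendite):
--     m = 0
--     for (reparto, categoria), (prodotto, (metodo, importo)) in tupla_vendite: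
--         if importo > m:
--             m = importo
--     prodotti = [prodotto for (reparto, categoria), (prodotto, (metodo, importo)) in tupla_vendite
--                 if importo == m]
--     return (m, prodotti)
-- ===== Notes on version B (the rewrite author's own statement) =====
-- stated objective: simpler
-- what changed: Replaces the interleaved reset/append running state with a two-phase decomposition: first find the maximum amount (floored at 0), then a single comprehension collecting products whose amount equals it.
import Mathlib
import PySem

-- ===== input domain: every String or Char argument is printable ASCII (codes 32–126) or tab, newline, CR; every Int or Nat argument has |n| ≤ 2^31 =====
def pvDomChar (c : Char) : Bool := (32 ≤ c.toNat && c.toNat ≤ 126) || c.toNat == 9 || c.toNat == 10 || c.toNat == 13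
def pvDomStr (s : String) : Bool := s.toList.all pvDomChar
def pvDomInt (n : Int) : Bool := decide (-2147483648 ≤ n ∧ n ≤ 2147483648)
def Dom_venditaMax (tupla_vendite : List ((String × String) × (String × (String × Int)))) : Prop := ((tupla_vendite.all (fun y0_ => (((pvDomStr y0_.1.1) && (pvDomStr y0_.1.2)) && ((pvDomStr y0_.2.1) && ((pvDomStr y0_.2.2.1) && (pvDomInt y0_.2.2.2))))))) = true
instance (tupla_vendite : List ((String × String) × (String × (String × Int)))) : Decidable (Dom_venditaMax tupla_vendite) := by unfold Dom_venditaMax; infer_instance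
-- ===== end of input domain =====

-- B replaces A's interleaved reset/append running state with a simpler two-phase
-- decomposition (find the max floored at 0, then filter by equality); return values equal.

-- ===== PORT A =====
-- loop keeps state (vendita_max, prodotto_max); branches in A's order
def venditaMax (tupla_vendite : List ((String × String) × (String × (String × Int)))) : Int × List String :=
  tupla_vendite.foldl
    (fun st x =>
      let importo := x.2.2.2
      let prodotto := x.2.1
      if importo > st.1 then (importo, [prodotto])
      else if importo = st.1 then (st.1, st.2 ++ [prodotto])
      else st)
    (0, [])

-- ===== PORT B =====
def venditaMax_alt (tupla_vendite : List ((String × String) × (String × (String × Int)))) : Int × List String :=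
  let m := tupla_vendite.foldl (fun m x => if x.2.2.2 > m then x.2.2.2 else m) 0
  (m, (tupla_vendite.filter (fun x => x.2.2.2 = m)).map (fun x => x.2.1))

-- ===== PRECONDITION & SPEC =====
def Spec_venditaMax (tupla_vendite : List ((String × String) × (String × (String × Int)))) (out : Int × List String) : Prop := out = venditaMax_alt tupla_vendite
instance (tupla_vendite : List ((String × String) × (String × (String × Int)))) (out : Int × List String) : Decidable (Spec_venditaMax tupla_vendite out) := by unfold Spec_venditaMax; infer_instance

-- ===== CLAIM (what is proved, stated in full; the proofs are below) =====
def Claim_equal_venditaMax : Prop := ∀ (tupla_vendite : List ((String × String) × (String × (String × Int)))), Dom_venditaMax tupla_vendite → Spec_venditaMax tupla_vendite (venditaMax tupla_vendite)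

-- ===== LEMMAS AND PROOFS =====

theorem vm_le_foldl_max (xs : List ((String × String) × (String × (String × Int)))) (v : Int) :
    v ≤ xs.foldl (fun m x => if x.2.2.2 > m then x.2.2.2 else m) v := by
  induction xs generalizing v with
  | nil => simp
  | cons x xs ih =>
    simp only [List.foldl_cons]
    split
    · exact le_trans (le_of_lt (by assumption)) (ih _)
    · exact ih _

theorem vm_invariant (xs : List ((String × String) × (String × (String × Int)))) (v : Int) (ps : List String) :
    xs.foldl
      (fun st x =>
        let importo := x.2.2.2
        let prodotto := x.2.1
        if importo > st.1 then (importo, [prodotto])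
        else if importo = st.1 then (st.1, st.2 ++ [prodotto])
        else st)
      (v, ps)
    = (xs.foldl (fun m x => if x.2.2.2 > m then x.2.2.2 else m) v,
       (if xs.foldl (fun m x => if x.2.2.2 > m then x.2.2.2 else m) v = v then ps else [])
         ++ (xs.filter (fun x => x.2.2.2 = xs.foldl (fun m x => if x.2.2.2 > m then x.2.2.2 else m) v)).map (fun x => x.2.1)) := by
  induction xs generalizing v ps with
  | nil => simp
  | cons x xs ih =>
    simp only [List.foldl_cons]
    have hM := vm_le_foldl_max xs (if x.2.2.2 > v then x.2.2.2 else v)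
    by_cases h1 : x.2.2.2 > v
    · simp only [if_pos h1] at hM ⊢
      rw [ih]
      have hMv : ¬ xs.foldl (fun m x => if x.2.2.2 > m then x.2.2.2 else m) x.2.2.2 = v := by
        intro he; omega
      by_cases h2 : xs.foldl (fun m x => if x.2.2.2 > m then x.2.2.2 else m) x.2.2.2 = x.2.2.2
      · simp only [h2, if_pos rfl, if_neg hMv, List.filter_cons, List.map_cons, decide_eq_true_eq,
          if_pos rfl, List.nil_append]
        rw [if_neg (by omega : ¬ x.2.2.2 = v)]
        simp
      · have hx : ¬ x.2.2.2 = xs.foldl (fun m x => if x.2.2.2 > m then x.2.2.2 else m) x.2.2.2 :=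
          fun he => h2 he.symm
        simp [h2, hMv, List.filter_cons, hx]
    · simp only [if_neg h1] at hM ⊢
      by_cases h2 : x.2.2.2 = v
      · simp only [if_neg (by omega : ¬ x.2.2.2 > v), if_pos h2]
        rw [ih]
        by_cases h3 : xs.foldl (fun m x => if x.2.2.2 > m then x.2.2.2 else m) v = v
        · simp [h3, List.filter_cons, h2]
        · have : ¬ x.2.2.2 = xs.foldl (fun m x => if x.2.2.2 > m then x.2.2.2 else m) v := by
            omega
          simp [h3, List.filter_cons, this]
      · simp only [if_neg (by omega : ¬ x.2.2.2 > v), if_neg h2]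
        rw [ih]
        have : ¬ x.2.2.2 = xs.foldl (fun m x => if x.2.2.2 > m then x.2.2.2 else m) v := by
          omega
        simp [List.filter_cons, this]

-- ===== VERDICT (by name: the statement is the Claim_ definition above) =====
theorem venditaMax_spec : Claim_equal_venditaMax := by
  intro xs _
  unfold Spec_venditaMax venditaMax venditaMax_alt
  rw [vm_invariant]
  simp
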